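-- pv_equiv track=rewrite | github.com/cat-mcs/PolyasEnumerationTheorem | Chessboard.py | rotate180
-- ===== SOURCE A (Python) =====
-- import math as mth
--
-- def rotate180(num,r):
--
--     # if board dimension modulo 4 is 0 or 2
--     if r == 0 or r == 2:
--         p = 0
--     # if board dimension modulo 4 is 1 or 3
--     if r == 1 or r == 3:
--         p = 1
--
--     # define list for storing terms of the formula
--     ii = []
--     # counter
--     k = 0
--
--     # while terms of the formula are positive
--     while num > p + 2*k:
--
--         # applying formula and append result
--         term = num - (p + 2*k)
--         ii.append(term)
--         # increase counter
--         k = k + 1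
--
--     # return the product of the terms in list
--     return mth.prod(ii)
-- ===== SOURCE B (Python) =====
-- import math as mth
--
-- def rotate180(num, r):
--     # closed form: the loop product is the double factorial of a = num - p
--     if r in (0, 2):
--         p = 0
--     elif r in (1, 3):
--         p = 1
--     a = num - p
--     if a <= 0:
--         return 1
--     half = a // 2
--     if a % 2 == 0:
--         return 2**half * mth.factorial(half)
--     return mth.factorial(a) // (2**half * mth.factorial(half))
-- ===== Notes on version B (the rewrite author's own statement) =====
-- stated objective: faster
-- what changed: Replaces the term-accumulating while loop with a closed-form double-factorial formula built from math.factorial and a power of two.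
import Mathlib
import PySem

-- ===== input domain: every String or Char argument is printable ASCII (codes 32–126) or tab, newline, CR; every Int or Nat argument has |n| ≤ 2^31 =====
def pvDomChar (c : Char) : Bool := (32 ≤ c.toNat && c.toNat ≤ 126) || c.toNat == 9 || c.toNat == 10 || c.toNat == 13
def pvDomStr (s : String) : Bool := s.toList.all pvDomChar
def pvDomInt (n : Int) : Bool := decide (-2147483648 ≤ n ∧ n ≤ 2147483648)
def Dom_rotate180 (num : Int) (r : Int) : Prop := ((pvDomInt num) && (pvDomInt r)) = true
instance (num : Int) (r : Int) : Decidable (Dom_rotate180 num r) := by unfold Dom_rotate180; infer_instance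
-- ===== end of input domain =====

-- B replaces A's term-accumulating while loop by a closed-form double-factorial formula (factorials and a power of two); objective: faster (O(1) library calls vs an O(n) multiplication loop).


-- ===== PORT A =====
-- the while loop: while num > p + 2*k: ii.append(num - (p + 2*k)); k += 1
def rotate180Loop (num p k : Int) (ii : List Int) : List Int :=
  if num > p + 2 * k then
    rotate180Loop num p (k + 1) (ii ++ [num - (p + 2 * k)])
  else ii
termination_by (num - p - 2 * k).toNat
decreasing_by omega

def rotate180 (num : Int) (r : Int) : Int :=
  -- Python assigns p in two separate ifs; for r outside {0,1,2,3} p is never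
  -- assigned and Python raises UnboundLocalError (excluded by Pre_; the final
  -- else 0 here is unreachable under Pre_).
  let p : Int := if r = 0 ∨ r = 2 then 0 else if r = 1 ∨ r = 3 then 1 else 0
  (rotate180Loop num p 0 []).prod   -- mth.prod(ii)

-- ===== PORT B =====
def rotate180_alt (num : Int) (r : Int) : Int :=
  -- p assigned only for r in {0,1,2,3} (as in A; outside, Python raises — excluded
  -- by Pre_, so the default 1 of the else branch is never reached)
  let p : Int := if r = 0 ∨ r = 2 then 0 else if r = 1 ∨ r = 3 then 1 else 1
  let a := num - p
  if a ≤ 0 then 1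
  else
    let half := PySem.Int.floordiv a 2
    if PySem.Int.mod a 2 = 0 then
      2 ^ half.toNat * (Nat.factorial half.toNat : Int)
    else
      PySem.Int.floordiv (Nat.factorial a.toNat : Int)
        (2 ^ half.toNat * (Nat.factorial half.toNat : Int))

-- ===== PRECONDITION & SPEC =====
-- Pre_ excludes r outside {0,1,2,3}: there Python's A raises UnboundLocalError (p is never assigned).
def Pre_rotate180 (num : Int) (r : Int) : Prop := r = 0 ∨ r = 1 ∨ r = 2 ∨ r = 3
instance (num : Int) (r : Int) : Decidable (Pre_rotate180 num r) := by unfold Pre_rotate180; infer_instance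
def pvWitness_rotate180 : Int × Int := (10, 1)

def Spec_rotate180 (num : Int) (r : Int) (out : Int) : Prop := out = rotate180_alt num r
instance (num : Int) (r : Int) (out : Int) : Decidable (Spec_rotate180 num r out) := by unfold Spec_rotate180; infer_instance

-- ===== CLAIM (what is proved, stated in full; the proofs are below) =====
def Claim_equal_rotate180 : Prop := ∀ (num : Int) (r : Int), Dom_rotate180 num r → Pre_rotate180 num r → Spec_rotate180 num r (rotate180 num r)

-- ===== LEMMAS AND PROOFS =====

-- double factorial of a (proof-side characterisation of A's loop product)
def dfac (m : Int) : Int := if 0 < m then m * dfac (m - 2) else 1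
termination_by m.toNat
decreasing_by omega

lemma rotate180Loop_prod : ∀ (n : Nat) (num p k : Int) (ii : List Int),
    (num - p - 2 * k).toNat ≤ n →
    (rotate180Loop num p k ii).prod = ii.prod * dfac (num - p - 2 * k) := by
  intro n
  induction n with
  | zero =>
    intro num p k ii h
    rw [rotate180Loop, dfac]
    rw [if_neg (by omega), if_neg (by omega)]
    ring
  | succ n ih =>
    intro num p k ii h
    rw [rotate180Loop, dfac]
    by_cases hc : num > p + 2 * k
    · rw [if_pos hc, if_pos (by omega)]
      rw [ih num p (k+1) _ (by omega)]
      simp [List.prod_append]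
      have : num - p - 2 * (k + 1) = num - p - 2 * k - 2 := by ring
      rw [this]
      ring
    · rw [if_neg hc, if_neg (by omega)]
      ring

lemma dfac_even : ∀ (n : Nat), dfac (2 * (n : Int)) = 2 ^ n * (Nat.factorial n : Int) := by
  intro n
  induction n with
  | zero => rw [dfac]; norm_num
  | succ n ih =>
    rw [dfac, if_pos (by positivity)]
    have : (2 : Int) * (↑(n+1)) - 2 = 2 * n := by push_cast; ring
    rw [this, ih, Nat.factorial_succ]
    push_cast
    ring

lemma dfac_odd : ∀ (n : Nat), (2 ^ n * (Nat.factorial n : Int)) * dfac (2 * (n : Int) + 1) = (Nat.factorial (2 * n + 1) : Int) := by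
  intro n
  induction n with
  | zero => rw [dfac, if_pos (by norm_num), dfac]; norm_num
  | succ n ih =>
    rw [dfac, if_pos (by positivity)]
    have h1 : (2 : Int) * (↑(n+1)) + 1 - 2 = 2 * n + 1 := by push_cast; ring
    rw [h1]
    have h3 : Nat.factorial (2 * (n + 1) + 1) = (2*n+3) * ((2*n+2) * Nat.factorial (2*n+1)) := by
      rw [show 2*(n+1)+1 = (2*n+2)+1 from by ring, Nat.factorial_succ,
          show 2*n+2 = (2*n+1)+1 from by ring, Nat.factorial_succ]
    rw [h3, Nat.factorial_succ]
    push_cast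
    linear_combination ((2*(n:Int)+3)*(2*(n:Int)+2)) * ih

lemma key (num p : Int) :
    (rotate180Loop num p 0 []).prod =
      (if num - p ≤ 0 then (1 : Int) else
        if PySem.Int.mod (num - p) 2 = 0 then
          2 ^ (PySem.Int.floordiv (num - p) 2).toNat * (Nat.factorial (PySem.Int.floordiv (num - p) 2).toNat : Int)
        else
          PySem.Int.floordiv (Nat.factorial (num - p).toNat : Int)
            (2 ^ (PySem.Int.floordiv (num - p) 2).toNat * (Nat.factorial (PySem.Int.floordiv (num - p) 2).toNat : Int))) := by
  have hl := rotate180Loop_prod (num - p - 2 * 0).toNat num p 0 [] le_rfl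
  rw [hl]
  simp only [List.prod_nil, one_mul]
  have he : num - p - 2 * 0 = num - p := by ring
  rw [he]
  set a := num - p with ha
  by_cases h0 : a ≤ 0
  · rw [if_pos h0, dfac, if_neg (by omega)]
  · rw [if_neg h0]
    push Not at h0
    obtain ⟨m, hm⟩ : ∃ m : Nat, a = (m : Int) := ⟨a.toNat, (Int.toNat_of_nonneg h0.le).symm⟩
    rw [PySem.Int.mod_eq_emod_of_pos (b := 2) (by norm_num), PySem.Int.floordiv_eq_ediv_of_pos (b := 2) (by norm_num)]
    rw [hm]
    have hdiv : ((m : Int)) / 2 = ((m / 2 : Nat) : Int) := by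
      exact_mod_cast (Int.natCast_div m 2).symm
    have hmod : ((m : Int)) % 2 = ((m % 2 : Nat) : Int) := by
      exact_mod_cast (Int.natCast_mod m 2).symm
    rw [hdiv, hmod, Int.toNat_natCast, Int.toNat_natCast]
    rcases Nat.even_or_odd m with he2 | ho2
    · obtain ⟨t, ht⟩ := he2
      have hm2 : m = 2 * t := by omega
      rw [if_pos (by exact_mod_cast by omega : ((m % 2 : Nat) : Int) = 0)]
      rw [hm2, show (2*t)/2 = t from by omega]
      rw [show ((2*t : Nat) : Int) = 2 * (t : Int) from by push_cast; ring]
      exact dfac_even t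
    · obtain ⟨t, ht⟩ := ho2
      rw [if_neg (by exact_mod_cast by omega : ¬ ((m % 2 : Nat) : Int) = 0)]
      rw [ht, show (2*t+1)/2 = t from by omega]
      have hpos : (0:Int) < 2 ^ t * (Nat.factorial t : Int) :=
        mul_pos (by positivity) (by exact_mod_cast t.factorial_pos)
      rw [PySem.Int.floordiv_eq_ediv_of_pos hpos]
      rw [show ((2*t+1 : Nat) : Int) = 2 * (t : Int) + 1 from by push_cast; ring]
      rw [← dfac_odd t]
      exact (Int.mul_ediv_cancel_left _ (ne_of_gt hpos)).symm

-- ===== VERDICT (by name: the statement is the Claim_ definition above) =====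
theorem rotate180_spec : Claim_equal_rotate180 := by
  intro num r _ hpre
  unfold Spec_rotate180 rotate180 rotate180_alt
  have hp : (if r = 0 ∨ r = 2 then (0:Int) else if r = 1 ∨ r = 3 then 1 else 0)
      = (if r = 0 ∨ r = 2 then (0:Int) else if r = 1 ∨ r = 3 then 1 else 1) := by
    rcases hpre with rfl | rfl | rfl | rfl <;> simp
  rw [hp]
  exact key num _
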